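-- pv_equiv track=rewrite | github.com/Yaksh-Projectkmt/OEA_AI_DEV | cpuprocess.py | classify_cores
-- ===== SOURCE A (Python) =====
-- from collections import defaultdict
--
-- def classify_cores(cpuinfo):
--     # Group cores by model name + cache size as a heuristic
--     core_groups = defaultdict(list)
--
--     for info in cpuinfo:
--         cpu_id = int(info.get("processor", -1))
--         model = info.get("model name", "unknown")
--         cache = info.get("cache size", "unknown")
--         key = f"{model}-{cache}"
--         core_groups[key].append(cpu_id)
--
--     # Sort groups by number of CPUs or alphabetically
--     groups = list(core_groups.values())
--     if len(groups) == 1: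
--         return groups[0], []  # only one core type
--     else:
--         # Assume group with more cores is E-core group (as on Intel CPUs)
--         groups.sort(key=lambda g: max(g))  # or by avg CPU ID
--         return groups[-1], groups[0]  # p_cores, e_cores
-- ===== SOURCE B (Python) =====
-- def classify_cores(cpuinfo):
--     # Group cores by model name + cache size as a heuristic
--     groups = {}
--     for info in cpuinfo:
--         cpu_id = int(info.get("processor", -1))
--         key = f"{info.get('model name', 'unknown')}-{info.get('cache size', 'unknown')}"
--         groups.setdefault(key, []).append(cpu_id)
--
--     gs = list(groups.values())
--     if len(gs) == 1:
--         return gs[0], []  # only one core type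
--
--     # One pass over the groups: the group holding the highest cpu id is the
--     # P-core group, the one holding the lowest top cpu id the E-core group.
--     p = e = gs[0]
--     pm = em = max(gs[0])
--     for g in gs[1:]:
--         m = max(g)
--         if m >= pm:
--             p, pm = g, m
--         if m < em:
--             e, em = g, m
--     return p, e
-- ===== Notes on version B (the rewrite author's own statement) =====
-- stated objective: simpler
-- what changed: Keeps the one grouping pass but replaces the stable sort of the whole group list by a single linear scan that tracks the group with the highest max cpu id (P-cores) and the one with the lowest (E-cores); Pre_ excludes only the inputs where A raises (empty input: IndexError; unparseable 'processor' value: ValueError).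
import Mathlib
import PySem

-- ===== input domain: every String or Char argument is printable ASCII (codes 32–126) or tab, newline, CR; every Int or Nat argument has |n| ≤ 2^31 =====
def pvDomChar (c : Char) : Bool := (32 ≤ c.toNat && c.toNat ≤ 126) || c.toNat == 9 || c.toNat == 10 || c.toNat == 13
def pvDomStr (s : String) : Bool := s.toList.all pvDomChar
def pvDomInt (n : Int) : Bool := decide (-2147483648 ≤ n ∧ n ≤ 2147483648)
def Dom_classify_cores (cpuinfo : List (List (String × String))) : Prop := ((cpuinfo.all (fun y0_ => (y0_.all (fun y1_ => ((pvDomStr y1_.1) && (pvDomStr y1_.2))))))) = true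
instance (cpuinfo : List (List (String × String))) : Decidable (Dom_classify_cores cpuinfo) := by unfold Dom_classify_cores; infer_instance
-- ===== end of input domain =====

-- B keeps A's grouping pass but replaces the stable sort of the group list by a single
-- linear scan tracking the group with the highest / lowest maximal cpu id; objective: simpler.

-- ===== PORT A =====

-- max(g) for a nonempty list of ints (Python's builtin max; every group A/B build is nonempty,
-- so the 0 default of the total form is never the value used on admitted inputs)
def pyMax (g : List Int) : Int := (PySem.List.max? g (fun x => x)).getD 0

def classify_cores (cpuinfo : List (List (String × String))) : List Int × List Int :=
  let core_groups : PySem.Dict String (List Int) :=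
    cpuinfo.foldl (fun d info =>
      let cpu_id : Int :=
        match (PySem.Dict.ofList info).get? "processor" with
        | none => -1
        | some s => (PySem.Int.ofStr? s).getD 0  -- int(s); the ValueError case (none) is excluded by Pre_
      let model : String := ((PySem.Dict.ofList info).get? "model name").getD "unknown"
      let cache : String := ((PySem.Dict.ofList info).get? "cache size").getD "unknown"
      let key : String := model ++ "-" ++ cache
      d.modify key [] (fun g => g ++ [cpu_id])) PySem.Dict.empty
  let groups : List (List Int) := core_groups.values
  if groups.length == 1 then
    (PySem.List.pyGetD groups 0 [], [])
  else
    let sortedGroups := PySem.List.sorted groups pyMax false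
    -- groups[-1], groups[0]; the IndexError on an empty list is excluded by Pre_
    (PySem.List.pyGetD sortedGroups (-1) [], PySem.List.pyGetD sortedGroups 0 [])

-- ===== PORT B =====

def classify_cores_alt (cpuinfo : List (List (String × String))) : List Int × List Int :=
  let groups : PySem.Dict String (List Int) :=
    cpuinfo.foldl (fun d info =>
      let cpu_id : Int :=
        match (PySem.Dict.ofList info).get? "processor" with
        | none => -1
        | some s => (PySem.Int.ofStr? s).getD 0  -- int(s); the ValueError case (none) is excluded by Pre_
      let key : String := ((PySem.Dict.ofList info).get? "model name").getD "unknown" ++ "-"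
        ++ ((PySem.Dict.ofList info).get? "cache size").getD "unknown"
      d.modify key [] (fun g => g ++ [cpu_id])) PySem.Dict.empty
  let gs : List (List Int) := groups.values
  if gs.length == 1 then
    (PySem.List.pyGetD gs 0 [], [])
  else
    match gs with
    | [] => ([], [])  -- gs[0]: IndexError in Python, excluded by Pre_
    | g0 :: rest =>
      -- p = e = gs[0]; pm = em = max(gs[0]); one pass over gs[1:]
      let st := rest.foldl
        (fun (s : (List Int × Int) × (List Int × Int)) g =>
          let m := pyMax g
          ((if s.1.2 ≤ m then (g, m) else s.1),
           (if m < s.2.2 then (g, m) else s.2)))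
        ((g0, pyMax g0), (g0, pyMax g0))
      (st.1.1, st.2.1)

-- ===== PRECONDITION & SPEC =====

-- Pre_ excludes exactly the inputs on which A raises: the empty list (IndexError on groups[-1])
-- and any cpu entry whose "processor" value is not int()-parseable (ValueError).
def Pre_classify_cores (cpuinfo : List (List (String × String))) : Prop :=
  cpuinfo ≠ [] ∧
    (cpuinfo.all (fun info =>
      (((PySem.Dict.ofList info).get? "processor").all
        (fun s => (PySem.Int.ofStr? s).isSome)))) = true
instance (cpuinfo : List (List (String × String))) : Decidable (Pre_classify_cores cpuinfo) := by
  unfold Pre_classify_cores; infer_instance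

def pvWitness_classify_cores : (List (List (String × String))) :=
  [[("processor", "0"), ("model name", "A"), ("cache size", "1 KB")],
   [("processor", "1"), ("model name", "B")]]

def Spec_classify_cores (cpuinfo : List (List (String × String))) (out : List Int × List Int) : Prop := out = classify_cores_alt cpuinfo
instance (cpuinfo : List (List (String × String))) (out : List Int × List Int) : Decidable (Spec_classify_cores cpuinfo out) := by unfold Spec_classify_cores; infer_instance

-- ===== CLAIM (what is proved, stated in full; the proofs are below) =====
def Claim_equal_classify_cores : Prop := ∀ (cpuinfo : List (List (String × String))), Dom_classify_cores cpuinfo → Pre_classify_cores cpuinfo → Spec_classify_cores cpuinfo (classify_cores cpuinfo)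

-- ===== LEMMAS AND PROOFS =====

theorem insertBy_ne_nil {α : Type} (b : α → α → Bool) (x : α) (l : List α) :
    PySem.List.insertBy b x l ≠ [] := by
  cases l with
  | nil => simp [PySem.List.insertBy]
  | cons y t => simp only [PySem.List.insertBy]; split_ifs <;> simp

theorem head?_insertBy {α : Type} (key : α → Int) (x : α) (l : List α) :
    (PySem.List.insertBy (fun a b => decide (key a < key b)) x l).head? =
      some (match l.head? with | none => x | some y => if key x < key y then x else y) := by
  cases l with
  | nil => simp [PySem.List.insertBy]
  | cons y t => simp only [PySem.List.insertBy]; split_ifs <;> simp_all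

theorem getLast?_cons_of_ne_nil {α : Type} (a : α) {l : List α} (h : l ≠ []) :
    (a :: l).getLast? = l.getLast? := by
  cases l with
  | nil => exact absurd rfl h
  | cons b t => exact List.getLast?_cons_cons ..

theorem getLast?_insertBy {α : Type} (key : α → Int) (x : α) (l : List α)
    (hl : l.Pairwise (fun a b => key a ≤ key b)) :
    (PySem.List.insertBy (fun a b => decide (key a < key b)) x l).getLast? =
      some (match l.getLast? with | none => x | some m => if key x < key m then m else x) := by
  induction l with
  | nil => simp [PySem.List.insertBy]
  | cons y t ih =>
    rw [List.pairwise_cons] at hl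
    by_cases h : key x < key y
    · simp only [PySem.List.insertBy, h, decide_true, if_true]
      rw [getLast?_cons_of_ne_nil x (List.cons_ne_nil y t)]
      cases ht : (y :: t).getLast? with
      | none => exact absurd ht (by simp)
      | some m =>
        have hm : m ∈ y :: t := List.mem_of_getLast? ht
        have hym : key y ≤ key m := by
          rcases List.mem_cons.mp hm with rfl | hmt
          · exact le_refl _
          · exact hl.1 m hmt
        simp [lt_of_lt_of_le h hym]
    · simp only [PySem.List.insertBy, h, decide_false, Bool.false_eq_true, if_false]
      rw [getLast?_cons_of_ne_nil y (insertBy_ne_nil _ x t), ih hl.2]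
      cases t with
      | nil => simp [h]
      | cons z t' => rw [List.getLast?_cons_cons]

theorem foldl_max_some {α : Type} (key : α → Int) (l : List α) (a : α) :
    l.foldl
      (fun acc x =>
        match acc with
        | none => some x
        | some m => if key m < key x then some x else some m) (some a)
    = some (match PySem.List.max? l key with
            | none => a
            | some m => if key a < key m then m else a) := by
  induction l generalizing a with
  | nil => simp [PySem.List.max?]
  | cons c t ih =>
    have hm : PySem.List.max? (c :: t) key
        = some (match PySem.List.max? t key with
                | none => c
                | some m => if key c < key m then m else c) := by
      simp only [PySem.List.max?, List.foldl_cons]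
      exact ih c
    simp only [List.foldl_cons]
    show t.foldl _ (if key a < key c then some c else some a) = _
    rw [hm]
    by_cases h : key a < key c
    · rw [if_pos h, ih c]
      cases hmt : PySem.List.max? t key with
      | none => simp [h]
      | some m => simp only []; split_ifs <;> first | rfl | omega
    · rw [if_neg h, ih a]
      cases hmt : PySem.List.max? t key with
      | none => simp [h]
      | some m => simp only []; split_ifs <;> first | rfl | omega

theorem min?_append_singleton {α : Type} (key : α → Int) (ys : List α) (x : α) :
    PySem.List.min? (ys ++ [x]) key =
      some (match PySem.List.min? ys key with
            | none => x
            | some m => if key x < key m then x else m) := by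
  simp only [PySem.List.min?, List.foldl_append, List.foldl_cons, List.foldl_nil]
  cases List.foldl _ none ys with
  | none => rfl
  | some m => simp only []; split_ifs <;> rfl

theorem max?_reverse_append {α : Type} (key : α → Int) (ys : List α) (x : α) :
    PySem.List.max? (ys ++ [x]).reverse key =
      some (match PySem.List.max? ys.reverse key with
            | none => x
            | some m => if key x < key m then m else x) := by
  rw [List.reverse_append]
  show (x :: ys.reverse).foldl _ none = _
  rw [List.foldl_cons]
  exact foldl_max_some key ys.reverse x

theorem head?_sorted {α : Type} (key : α → Int) (xs : List α) :
    (PySem.List.sorted xs key false).head? = PySem.List.min? xs key := by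
  induction xs using List.reverseRecOn with
  | nil => simp [PySem.List.sorted, PySem.List.min?]
  | append_singleton ys x ih =>
    rw [PySem.List.sorted_eq_foldl_insertBy, List.foldl_append, List.foldl_cons, List.foldl_nil,
      ← PySem.List.sorted_eq_foldl_insertBy, head?_insertBy, ih, min?_append_singleton]

theorem getLast?_sorted {α : Type} (key : α → Int) (xs : List α) :
    (PySem.List.sorted xs key false).getLast? = PySem.List.max? xs.reverse key := by
  induction xs using List.reverseRecOn with
  | nil => simp [PySem.List.sorted, PySem.List.max?]
  | append_singleton ys x ih =>
    rw [PySem.List.sorted_eq_foldl_insertBy, List.foldl_append, List.foldl_cons, List.foldl_nil,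
      ← PySem.List.sorted_eq_foldl_insertBy,
      getLast?_insertBy key x _ (PySem.List.sorted_pairwise ys key), ih, max?_reverse_append]

theorem modify_items_ne_nil {κ ν : Type} [BEq κ] (d : PySem.Dict κ ν) (k : κ) (dflt : ν)
    (f : ν → ν) : (d.modify k dflt f).items ≠ [] := by
  unfold PySem.Dict.modify PySem.Dict.insert
  split_ifs with h
  · cases hd : d.items with
    | nil => exact absurd h (by simp [PySem.Dict.contains, hd])
    | cons p t => simp
  · simp

theorem getD_zero_eq_head?_getD {α : Type} (l : List α) (d : α) :
    l.getD 0 d = l.head?.getD d := by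
  cases l <;> simp

-- A's else-branch picks (last, first) of the stable ascending sort by pyMax:
theorem sorted_picks (gs : List (List Int)) (hG : gs ≠ []) :
    (PySem.List.pyGetD (PySem.List.sorted gs pyMax false) (-1) [],
     PySem.List.pyGetD (PySem.List.sorted gs pyMax false) 0 [])
    = ((PySem.List.max? gs.reverse pyMax).getD [],
       (PySem.List.min? gs pyMax).getD []) := by
  have hsne : PySem.List.sorted gs pyMax false ≠ [] := by
    rw [ne_eq, PySem.List.sorted_eq_nil_iff]; exact hG
  have hlast := getLast?_sorted pyMax gs
  rw [List.getLast?_eq_some_getLast hsne] at hlast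
  rw [PySem.List.pyGetD_neg_one _ _ hsne, PySem.List.pyGetD_zero,
    getD_zero_eq_head?_getD, head?_sorted, ← hlast]
  rfl

-- the max?-fold step used in PySem.List.max?
def maxStep (o : Option (List Int)) (x : List Int) : Option (List Int) :=
  match o with
  | none => some x
  | some m => if pyMax m < pyMax x then some x else some m

theorem foldl_congr_fun {α β : Type} (f g : β → α → β) (h : ∀ b a, f b a = g b a)
    (l : List α) : ∀ b, l.foldl f b = l.foldl g b := by
  induction l with
  | nil => intro b; rfl
  | cons a t ih => intro b; rw [List.foldl_cons, List.foldl_cons, h, ih]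

theorem max?_eq_foldl_maxStep (l : List (List Int)) :
    PySem.List.max? l pyMax = l.foldl maxStep none := by
  unfold PySem.List.max?
  exact foldl_congr_fun _ _ (fun o x => by cases o <;> rfl) l none

theorem maxStep_two (o : Option (List Int)) (g a : List Int) :
    maxStep (maxStep o g) a = maxStep o (if pyMax a ≤ pyMax g then g else a) := by
  cases o with
  | none => simp only [maxStep]; split_ifs <;> simp_all <;> omega
  | some m => simp only [maxStep]; split_ifs <;> simp_all <;> omega

-- B's running "≥" maximum over a::l equals the first maximum of (a::l).reverse
theorem foldl_p_eq (l : List (List Int)) (a : List Int) :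
    l.foldl (fun (s : List Int × Int) g => if s.2 ≤ pyMax g then (g, pyMax g) else s)
      (a, pyMax a)
    = ((PySem.List.max? (a :: l).reverse pyMax).getD [],
       pyMax ((PySem.List.max? (a :: l).reverse pyMax).getD [])) := by
  induction l generalizing a with
  | nil => simp [PySem.List.max?]
  | cons g t ih =>
    rw [List.foldl_cons]
    have hstep : (if pyMax a ≤ pyMax g then ((g : List Int), pyMax g) else (a, pyMax a))
        = ((if pyMax a ≤ pyMax g then g else a),
           pyMax (if pyMax a ≤ pyMax g then g else a)) := by
      split_ifs <;> rfl
    have hrev : PySem.List.max? (a :: g :: t).reverse pyMax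
        = PySem.List.max? ((if pyMax a ≤ pyMax g then g else a) :: t).reverse pyMax := by
      rw [max?_eq_foldl_maxStep, max?_eq_foldl_maxStep]
      have h1 : (a :: g :: t).reverse = t.reverse ++ [g, a] := by
        simp
      have h2 : ((if pyMax a ≤ pyMax g then g else a) :: t).reverse
          = t.reverse ++ [if pyMax a ≤ pyMax g then g else a] := by
        simp
      rw [h1, h2, List.foldl_append, List.foldl_append]
      simp only [List.foldl_cons, List.foldl_nil]
      exact maxStep_two _ g a
    have : (if pyMax a ≤ pyMax g then ((g : List Int), pyMax g) else (a, pyMax a))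
        = (if (a, pyMax a).2 ≤ pyMax g then (g, pyMax g) else (a, pyMax a)) := rfl
    rw [← this, hstep, ih, hrev]

-- the min?-fold step used in PySem.List.min?
def minStep (o : Option (List Int)) (x : List Int) : Option (List Int) :=
  match o with
  | none => some x
  | some m => if pyMax x < pyMax m then some x else some m

theorem min?_eq_foldl_minStep (l : List (List Int)) :
    PySem.List.min? l pyMax = l.foldl minStep none := by
  unfold PySem.List.min?
  exact foldl_congr_fun _ _ (fun o x => by cases o <;> rfl) l none

-- B's running "<" minimum over a::l equals the first minimum of a::l
theorem foldl_e_eq (l : List (List Int)) (a : List Int) :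
    l.foldl (fun (s : List Int × Int) g => if pyMax g < s.2 then (g, pyMax g) else s)
      (a, pyMax a)
    = ((PySem.List.min? (a :: l) pyMax).getD [],
       pyMax ((PySem.List.min? (a :: l) pyMax).getD [])) := by
  induction l generalizing a with
  | nil => simp [PySem.List.min?]
  | cons g t ih =>
    rw [List.foldl_cons]
    have hstep : (if pyMax g < pyMax a then ((g : List Int), pyMax g) else (a, pyMax a))
        = ((if pyMax g < pyMax a then g else a),
           pyMax (if pyMax g < pyMax a then g else a)) := by
      split_ifs <;> rfl
    have hmin : PySem.List.min? (a :: g :: t) pyMax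
        = PySem.List.min? ((if pyMax g < pyMax a then g else a) :: t) pyMax := by
      rw [min?_eq_foldl_minStep, min?_eq_foldl_minStep]
      simp only [List.foldl_cons, minStep]
      split_ifs <;> rfl
    have : (if pyMax g < pyMax a then ((g : List Int), pyMax g) else (a, pyMax a))
        = (if pyMax g < (a, pyMax a).2 then (g, pyMax g) else (a, pyMax a)) := rfl
    rw [← this, hstep, ih, hmin]

-- B's paired fold splits into the two independent folds
theorem foldl_pair_split (l : List (List Int)) (x y : List Int × Int) :
    l.foldl
      (fun (s : (List Int × Int) × (List Int × Int)) g =>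
        ((if s.1.2 ≤ pyMax g then (g, pyMax g) else s.1),
         (if pyMax g < s.2.2 then (g, pyMax g) else s.2))) (x, y)
    = (l.foldl (fun (s : List Int × Int) g => if s.2 ≤ pyMax g then (g, pyMax g) else s) x,
       l.foldl (fun (s : List Int × Int) g => if pyMax g < s.2 then (g, pyMax g) else s) y) := by
  induction l generalizing x y with
  | nil => rfl
  | cons g t ih => simp only [List.foldl_cons]; exact ih _ _

theorem foldl_modify_ne_nil (l : List (List (String × String)))
    (f : PySem.Dict String (List Int) → List (String × String) → PySem.Dict String (List Int))
    (hf : ∀ d info, (f d info).items ≠ [])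
    (d : PySem.Dict String (List Int)) (h : l ≠ [] ∨ d.items ≠ []) :
    (l.foldl f d).items ≠ [] := by
  induction l generalizing d with
  | nil => simpa using h.resolve_left (by simp)
  | cons info t ih => rw [List.foldl_cons]; exact ih _ (Or.inr (hf d info))

-- the two ports build the same group dictionary
theorem groups_eq (cpuinfo : List (List (String × String))) :
    (cpuinfo.foldl (fun d info =>
      let cpu_id : Int :=
        match (PySem.Dict.ofList info).get? "processor" with
        | none => -1
        | some s => (PySem.Int.ofStr? s).getD 0
      let model : String := ((PySem.Dict.ofList info).get? "model name").getD "unknown"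
      let cache : String := ((PySem.Dict.ofList info).get? "cache size").getD "unknown"
      let key : String := model ++ "-" ++ cache
      d.modify key [] (fun g => g ++ [cpu_id])) PySem.Dict.empty)
    = (cpuinfo.foldl (fun d info =>
      let cpu_id : Int :=
        match (PySem.Dict.ofList info).get? "processor" with
        | none => -1
        | some s => (PySem.Int.ofStr? s).getD 0
      let key : String := ((PySem.Dict.ofList info).get? "model name").getD "unknown" ++ "-"
        ++ ((PySem.Dict.ofList info).get? "cache size").getD "unknown"
      d.modify key [] (fun g => g ++ [cpu_id])) PySem.Dict.empty) := rfl

-- ===== VERDICT (by name: the statement is the Claim_ definition above) =====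
theorem classify_cores_spec : Claim_equal_classify_cores := by
  intro cpuinfo _hdom hpre
  unfold Spec_classify_cores classify_cores classify_cores_alt
  simp only []
  rw [← groups_eq]
  set G := (cpuinfo.foldl (fun d info =>
      let cpu_id : Int :=
        match (PySem.Dict.ofList info).get? "processor" with
        | none => -1
        | some s => (PySem.Int.ofStr? s).getD 0
      let model : String := ((PySem.Dict.ofList info).get? "model name").getD "unknown"
      let cache : String := ((PySem.Dict.ofList info).get? "cache size").getD "unknown"
      let key : String := model ++ "-" ++ cache
      d.modify key [] (fun g => g ++ [cpu_id])) PySem.Dict.empty) with hGdef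
  have hvals : G.values ≠ [] := by
    have hitems : G.items ≠ [] := by
      rw [hGdef]
      refine foldl_modify_ne_nil cpuinfo _ (fun d info => ?_) _ (Or.inl hpre.1)
      exact modify_items_ne_nil d _ [] _
    simp only [PySem.Dict.values]
    intro hv
    exact hitems (List.map_eq_nil_iff.mp hv)
  split_ifs with h
  · rfl
  · cases hgs : G.values with
    | nil => exact absurd hgs hvals
    | cons g0 rest =>
      show (PySem.List.pyGetD (PySem.List.sorted (g0 :: rest) pyMax false) (-1) [],
            PySem.List.pyGetD (PySem.List.sorted (g0 :: rest) pyMax false) 0 [])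
          = ((rest.foldl (fun (s : (List Int × Int) × (List Int × Int)) g =>
                ((if s.1.2 ≤ pyMax g then (g, pyMax g) else s.1),
                 (if pyMax g < s.2.2 then (g, pyMax g) else s.2)))
              ((g0, pyMax g0), (g0, pyMax g0))).1.1,
             (rest.foldl (fun (s : (List Int × Int) × (List Int × Int)) g =>
                ((if s.1.2 ≤ pyMax g then (g, pyMax g) else s.1),
                 (if pyMax g < s.2.2 then (g, pyMax g) else s.2)))
              ((g0, pyMax g0), (g0, pyMax g0))).2.1)
      rw [sorted_picks (g0 :: rest) (by simp), foldl_pair_split, foldl_p_eq, foldl_e_eq]
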